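-- pv_equiv track=rewrite | github.com/MikeNieuweboer/Complexity_17 | src/ui_with_grid.py | get_filled_circle_coordinates
-- ===== SOURCE A (Python) =====
-- def get_filled_circle_coordinates(
--     center_row,
--     center_col,
--     radius,
-- ):  # <-- this is an LLM function
--     """Get all grid coordinates inside a circle (filled circle).
--
--     Parameters
--     ----------
--     center_row : int
--         Row coordinate of the circle center
--     center_col : int
--         Column coordinate of the circle center
--     radius : int
--         Radius of the circle
--
--     Returns
--     -------
--     list of tuples
--         List of (row, col) coordinates inside the circle
--
--     """
--     coordinates = []
--     radius_squared = radius * radius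
--
--     # Iterate through a bounding box
--     for row in range(center_row - radius, center_row + radius + 1):
--         for col in range(center_col - radius, center_col + radius + 1):
--             # Calculate distance squared (avoids sqrt for performance)
--             dx = col - center_col
--             dy = row - center_row
--             if dx * dx + dy * dy <= radius_squared:
--                 coordinates.append((row, col))
--     return coordinates
-- ===== SOURCE B (Python) =====
-- def _isqrt(n):
--     """Largest h >= 0 with h*h <= n (n >= 0)."""
--     h = 0
--     while (h + 1) * (h + 1) <= n:
--         h += 1
--     return h
--
--
-- def get_filled_circle_coordinates(
--     center_row,
--     center_col,
--     radius,
-- ):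
--     """Per-row span version: for each row, emit the whole run of columns
--     whose half-width is the integer square root of radius^2 - dy^2."""
--     coordinates = []
--     radius_squared = radius * radius
--     for row in range(center_row - radius, center_row + radius + 1):
--         dy = row - center_row
--         h = _isqrt(radius_squared - dy * dy)
--         for col in range(center_col - h, center_col + h + 1):
--             coordinates.append((row, col))
--     return coordinates
-- ===== Notes on version B (the rewrite author's own statement) =====
-- stated objective: alternative
-- what changed: Replaces the per-cell distance test over the whole bounding box with a per-row closed-form column span: each row's half-width is the integer square root of radius^2 - dy^2, so the inner loop emits exactly the in-circle run without testing any cell.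
import Mathlib
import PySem

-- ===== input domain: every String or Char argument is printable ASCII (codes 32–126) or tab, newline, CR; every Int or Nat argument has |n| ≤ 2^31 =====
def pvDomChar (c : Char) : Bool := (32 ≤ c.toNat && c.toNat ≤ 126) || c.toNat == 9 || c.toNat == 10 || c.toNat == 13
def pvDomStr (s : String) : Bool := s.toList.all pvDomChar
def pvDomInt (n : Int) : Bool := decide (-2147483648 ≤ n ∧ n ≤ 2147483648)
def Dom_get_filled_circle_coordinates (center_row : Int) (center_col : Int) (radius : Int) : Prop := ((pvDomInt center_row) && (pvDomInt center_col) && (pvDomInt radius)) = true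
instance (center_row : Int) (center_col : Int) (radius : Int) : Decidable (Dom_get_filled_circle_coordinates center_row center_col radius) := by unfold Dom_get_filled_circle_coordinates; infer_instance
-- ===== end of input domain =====

-- B replaces A's per-cell distance test over the bounding box with a per-row
-- integer-sqrt column span (an alternative algorithm of the same cost).

-- ===== PORT A =====
def get_filled_circle_coordinates (center_row : Int) (center_col : Int) (radius : Int) : List (Int × Int) :=
  let radius_squared := radius * radius
  (PySem.List.pyRange (center_row - radius) (center_row + radius + 1) 1).foldl
    (fun acc row =>
      (PySem.List.pyRange (center_col - radius) (center_col + radius + 1) 1).foldl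
        (fun acc col =>
          let dx := col - center_col
          let dy := row - center_row
          if dx * dx + dy * dy ≤ radius_squared then acc ++ [(row, col)] else acc)
        acc)
    []

-- ===== PORT B =====
-- while (h+1)*(h+1) <= n: h += 1   (B's hand-written integer square root)
def pvIsqrtGo (n : Int) (h : Nat) : Nat :=
  if ((h : Int) + 1) * ((h : Int) + 1) ≤ n then pvIsqrtGo n (h + 1) else h
termination_by n.toNat - h
decreasing_by
  rename_i hc
  have h1 : (h : Int) + 1 ≤ ((h : Int) + 1) * ((h : Int) + 1) := by nlinarith [Int.natCast_nonneg h]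
  have : (h : Int) + 1 ≤ n := le_trans h1 hc
  omega

def pvIsqrt (n : Int) : Nat := pvIsqrtGo n 0

def get_filled_circle_coordinates_alt (center_row : Int) (center_col : Int) (radius : Int) : List (Int × Int) :=
  let radius_squared := radius * radius
  (PySem.List.pyRange (center_row - radius) (center_row + radius + 1) 1).foldl
    (fun acc row =>
      let dy := row - center_row
      let h : Int := (pvIsqrt (radius_squared - dy * dy) : Int)
      (PySem.List.pyRange (center_col - h) (center_col + h + 1) 1).foldl
        (fun acc col => acc ++ [(row, col)]) acc)
    []

-- ===== PRECONDITION & SPEC =====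
def Spec_get_filled_circle_coordinates (center_row : Int) (center_col : Int) (radius : Int) (out : List (Int × Int)) : Prop := out = get_filled_circle_coordinates_alt center_row center_col radius
instance (center_row : Int) (center_col : Int) (radius : Int) (out : List (Int × Int)) : Decidable (Spec_get_filled_circle_coordinates center_row center_col radius out) := by unfold Spec_get_filled_circle_coordinates; infer_instance

-- ===== CLAIM (what is proved, stated in full; the proofs are below) =====
def Claim_equal_get_filled_circle_coordinates : Prop := ∀ (center_row : Int) (center_col : Int) (radius : Int), Dom_get_filled_circle_coordinates center_row center_col radius → Spec_get_filled_circle_coordinates center_row center_col radius (get_filled_circle_coordinates center_row center_col radius)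

-- ===== LEMMAS AND PROOFS =====

-- pvIsqrtGo n h is the largest g with g*g ≤ n, provided h*h ≤ n on entry
theorem pvIsqrtGo_spec (n : Int) (h : Nat) :
    (h : Int) * (h : Int) ≤ n →
    ((pvIsqrtGo n h : Int) * (pvIsqrtGo n h : Int) ≤ n) ∧
      n < ((pvIsqrtGo n h : Int) + 1) * ((pvIsqrtGo n h : Int) + 1) := by
  fun_induction pvIsqrtGo n h with
  | case1 h hc ih =>
      intro _
      exact ih (by push_cast; linarith)
  | case2 h hc =>
      intro hh
      exact ⟨hh, by linarith⟩

theorem pvIsqrt_le_iff (n x : Int) (hn : 0 ≤ n) :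
    x * x ≤ n ↔ -(pvIsqrt n : Int) ≤ x ∧ x ≤ (pvIsqrt n : Int) := by
  obtain ⟨h1, h2⟩ := pvIsqrtGo_spec n 0 (by simpa using hn)
  unfold pvIsqrt
  set g : Int := (pvIsqrtGo n 0 : Int) with hg
  have hg0 : 0 ≤ g := by positivity
  constructor
  · intro hx
    constructor
    · by_contra hcon
      push Not at hcon
      have h3 : g + 1 ≤ -x := by omega
      nlinarith [mul_le_mul h3 h3 (by linarith) (by linarith)]
    · by_contra hcon
      push Not at hcon
      have h3 : g + 1 ≤ x := by omega
      nlinarith [mul_le_mul h3 h3 (by linarith) (by linarith)]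
  · rintro ⟨hl, hr⟩
    nlinarith [mul_nonneg (sub_nonneg.mpr hr) (by linarith : (0:Int) ≤ g + x)]

-- filter of a 1-step range by an interval test = the sub-range
theorem filter_pyRange_interval (a b lo hi : Int) (ha : a ≤ lo) (hb : hi + 1 ≤ b)
    (hlohi : lo ≤ hi + 1) :
    (PySem.List.pyRange a b 1).filter (fun x => decide (lo ≤ x ∧ x ≤ hi)) =
      PySem.List.pyRange lo (hi + 1) 1 := by
  rw [PySem.List.pyRange_one_append a lo b ha (le_trans hlohi hb),
      PySem.List.pyRange_one_append lo (hi + 1) b hlohi hb]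
  have h1 : (PySem.List.pyRange a lo 1).filter (fun x => decide (lo ≤ x ∧ x ≤ hi)) = [] := by
    apply List.filter_eq_nil_iff.mpr
    intro x hx
    have := PySem.List.mem_pyRange_one.mp hx
    simp; omega
  have h2 : (PySem.List.pyRange lo (hi + 1) 1).filter (fun x => decide (lo ≤ x ∧ x ≤ hi)) =
      PySem.List.pyRange lo (hi + 1) 1 := by
    apply List.filter_eq_self.mpr
    intro x hx
    have := PySem.List.mem_pyRange_one.mp hx
    simp; omega
  have h3 : (PySem.List.pyRange (hi + 1) b 1).filter (fun x => decide (lo ≤ x ∧ x ≤ hi)) = [] := by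
    apply List.filter_eq_nil_iff.mpr
    intro x hx
    have := PySem.List.mem_pyRange_one.mp hx
    simp; omega
  simp only [List.filter_append, h1, h2, h3, List.nil_append, List.append_nil]

-- per-row: A's filtered column list = B's span
theorem row_eq (center_row center_col radius row : Int)
    (hrow : center_row - radius ≤ row ∧ row < center_row + radius + 1) :
    ((PySem.List.pyRange (center_col - radius) (center_col + radius + 1) 1).filter
        (fun col => decide ((col - center_col) * (col - center_col) +
          (row - center_row) * (row - center_row) ≤ radius * radius))).map
        (fun col => (row, col)) =
      (PySem.List.pyRange
          (center_col - (pvIsqrt (radius * radius - (row - center_row) * (row - center_row)) : Int))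
          (center_col + (pvIsqrt (radius * radius - (row - center_row) * (row - center_row)) : Int) + 1)
          1).map (fun col => (row, col)) := by
  set dy : Int := row - center_row with hdy
  have hr0 : 0 ≤ radius := by omega
  have hdyr : dy * dy ≤ radius * radius := by nlinarith [hrow.1, hrow.2]
  set n : Int := radius * radius - dy * dy with hn
  have hn0 : 0 ≤ n := by omega
  set g : Int := (pvIsqrt n : Int) with hgdef
  have hg0 : 0 ≤ g := by positivity
  have hgr : g ≤ radius := by
    have := (pvIsqrt_le_iff n g hn0).mpr ⟨by omega, le_refl g⟩
    nlinarith
  congr 1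
  have hcongr : (PySem.List.pyRange (center_col - radius) (center_col + radius + 1) 1).filter
      (fun col => decide ((col - center_col) * (col - center_col) + dy * dy ≤ radius * radius)) =
      (PySem.List.pyRange (center_col - radius) (center_col + radius + 1) 1).filter
      (fun col => decide (center_col - g ≤ col ∧ col ≤ center_col + g)) := by
    apply List.filter_congr
    intro col _
    have hiff := pvIsqrt_le_iff n (col - center_col) hn0
    simp only [decide_eq_decide]
    constructor
    · intro hle
      have := hiff.mp (by omega)
      omega
    · intro hcg
      have := hiff.mpr ⟨by omega, by omega⟩
      omega
  rw [hcongr, filter_pyRange_interval _ _ _ _ (by omega) (by omega) (by omega)]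

-- ===== VERDICT (by name: the statement is the Claim_ definition above) =====
theorem get_filled_circle_coordinates_spec : Claim_equal_get_filled_circle_coordinates := by
  intro center_row center_col radius _
  unfold Spec_get_filled_circle_coordinates
  unfold get_filled_circle_coordinates get_filled_circle_coordinates_alt
  simp only [PySem.List.foldl_append_ite, PySem.List.foldl_append_singleton_eq_map,
    PySem.List.foldl_append_eq_flatMap]
  simp only [List.nil_append]
  apply List.flatMap_congr
  intro row hrow
  exact row_eq center_row center_col radius row (PySem.List.mem_pyRange_one.mp hrow)
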